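-- pv_equiv track=rewrite | github.com/itssammurphy/linkedin_queens | solver.py | check_colour_regions
-- ===== SOURCE A (Python) =====
-- def check_colour_regions(board, size, regions):
--     colour_counts = {}
--     for row in range(size):
--         for col in range(size):
--             if regions[row][col] not in colour_counts:
--                 colour_counts[regions[row][col]] = 0
--             if board[row][col] == "Q":
--                 colour_counts[regions[row][col]] += 1
--
--     for _, count in colour_counts.items():
--         # only one queen allowed per region
--         if count > 1:
--             return False
--     return True
-- ===== SOURCE B (Python) =====
-- def check_colour_regions(board, size, regions):
--     queen_regions = sorted(
--         regions[row][col]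
--         for row in range(size)
--         for col in range(size)
--         if board[row][col] == "Q"
--     )
--     return all(x != y for x, y in zip(queen_regions, queen_regions[1:]))
-- ===== Notes on version B (the rewrite author's own statement) =====
-- stated objective: alternative
-- what changed: B detects a doubly-occupied region by sorting the list of regions of the queen cells and checking that no two adjacent sorted entries are equal, instead of A's per-region count dictionary followed by a scan over all counts.
import Mathlib
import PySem

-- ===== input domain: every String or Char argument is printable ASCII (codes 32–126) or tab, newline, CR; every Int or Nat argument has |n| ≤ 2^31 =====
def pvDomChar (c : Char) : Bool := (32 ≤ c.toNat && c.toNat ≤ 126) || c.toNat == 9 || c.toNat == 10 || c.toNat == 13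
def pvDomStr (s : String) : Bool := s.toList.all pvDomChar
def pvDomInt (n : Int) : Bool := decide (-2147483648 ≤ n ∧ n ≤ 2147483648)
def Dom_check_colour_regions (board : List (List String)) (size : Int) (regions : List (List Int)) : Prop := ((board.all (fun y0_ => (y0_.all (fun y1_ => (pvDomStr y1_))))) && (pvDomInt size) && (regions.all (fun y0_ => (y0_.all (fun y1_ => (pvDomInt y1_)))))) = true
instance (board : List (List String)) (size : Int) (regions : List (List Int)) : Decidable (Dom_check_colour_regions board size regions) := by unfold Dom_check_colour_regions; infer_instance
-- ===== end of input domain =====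

-- B sorts the regions of the queen cells and checks that no two adjacent sorted entries
-- are equal, replacing A's per-region count dictionary plus second scan (objective:
-- alternative algorithm). Return value only; no mutation.

-- ===== PORT A =====
-- one cell of A's nested loop: ensure the region has a count entry, then count a queen.
-- pyGetD defaults are unreachable under Pre_ (Python raises IndexError there).
def pvCellA (board : List (List String)) (regions : List (List Int))
    (d : PySem.Dict Int Int) (row col : Int) : PySem.Dict Int Int :=
  let g := PySem.List.pyGetD (PySem.List.pyGetD regions row []) col 0
  let d := if d.contains g then d else d.insert g 0
  if PySem.List.pyGetD (PySem.List.pyGetD board row []) col "" == "Q"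
  then d.modify g 0 (· + 1) else d

def check_colour_regions (board : List (List String)) (size : Int) (regions : List (List Int)) : Bool :=
  let colour_counts : PySem.Dict Int Int :=
    (PySem.List.pyRange 0 size 1).foldl (fun d row =>
      (PySem.List.pyRange 0 size 1).foldl (fun d col => pvCellA board regions d row col) d)
      PySem.Dict.empty
  colour_counts.items.all (fun p => !decide (p.2 > 1))

-- ===== PORT B =====
-- the generator expression: regions of the queen cells, row-major (filterMap = comprehension filter)
def pvQueenRegionsRaw (board : List (List String)) (size : Int) (regions : List (List Int)) : List Int :=
  (PySem.List.pyRange 0 size 1).flatMap (fun row =>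
    (PySem.List.pyRange 0 size 1).filterMap (fun col =>
      if PySem.List.pyGetD (PySem.List.pyGetD board row []) col "" == "Q"
      then some (PySem.List.pyGetD (PySem.List.pyGetD regions row []) col 0)
      else none))

def check_colour_regions_alt (board : List (List String)) (size : Int) (regions : List (List Int)) : Bool :=
  let queen_regions := PySem.List.sorted (pvQueenRegionsRaw board size regions) (fun x => x) false
  (queen_regions.zip (PySem.List.slice queen_regions (some 1) none)).all
    (fun p => !(p.1 == p.2))

-- ===== PRECONDITION & SPEC =====
-- Exactly the inputs on which the Python A returns (no IndexError): board and regions each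
-- have at least `size` rows, and each of their first `size` rows has at least `size` entries.
def Pre_check_colour_regions (board : List (List String)) (size : Int) (regions : List (List Int)) : Prop :=
  size.toNat ≤ board.length ∧ size.toNat ≤ regions.length ∧
  (∀ row ∈ board.take size.toNat, size.toNat ≤ row.length) ∧
  (∀ row ∈ regions.take size.toNat, size.toNat ≤ row.length)
instance (board : List (List String)) (size : Int) (regions : List (List Int)) : Decidable (Pre_check_colour_regions board size regions) := by unfold Pre_check_colour_regions; infer_instance

def pvWitness_check_colour_regions : List (List String) × Int × List (List Int) :=
  ([["Q", "."], [".", "Q"]], 2, [[0, 0], [1, 1]])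

def Spec_check_colour_regions (board : List (List String)) (size : Int) (regions : List (List Int)) (out : Bool) : Prop := out = check_colour_regions_alt board size regions
instance (board : List (List String)) (size : Int) (regions : List (List Int)) (out : Bool) : Decidable (Spec_check_colour_regions board size regions out) := by unfold Spec_check_colour_regions; infer_instance

-- ===== CLAIM (what is proved, stated in full; the proofs are below) =====
def Claim_equal_check_colour_regions : Prop := ∀ (board : List (List String)) (size : Int) (regions : List (List Int)), Dom_check_colour_regions board size regions → Pre_check_colour_regions board size regions → Spec_check_colour_regions board size regions (check_colour_regions board size regions)

-- ===== LEMMAS AND PROOFS =====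

-- the flattened cell sequence A's loops traverse, as (region, is-queen) pairs
def pvG (regions : List (List Int)) (rc : Int × Int) : Int :=
  PySem.List.pyGetD (PySem.List.pyGetD regions rc.1 []) rc.2 0

def pvQ (board : List (List String)) (rc : Int × Int) : Bool :=
  PySem.List.pyGetD (PySem.List.pyGetD board rc.1 []) rc.2 "" == "Q"

def pvCells (board : List (List String)) (size : Int) (regions : List (List Int)) : List (Int × Bool) :=
  ((PySem.List.pyRange 0 size 1).flatMap (fun r => (PySem.List.pyRange 0 size 1).map (fun c => (r, c)))).map
    (fun rc => (pvG regions rc, pvQ board rc))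

def pvStepA (d : PySem.Dict Int Int) (x : Int × Bool) : PySem.Dict Int Int :=
  let d' := if d.contains x.1 then d else d.insert x.1 0
  if x.2 then d'.modify x.1 0 (· + 1) else d'

-- regions of the queen cells, in scan order
def pvQueens (cs : List (Int × Bool)) : List Int := (cs.filter (·.2)).map (·.1)

lemma pvNestFold {σ : Type} (rows cols : List Int) (g : σ → Int → Int → σ) (init : σ) :
    rows.foldl (fun a r => cols.foldl (fun a c => g a r c) a) init
      = ((rows.flatMap (fun r => cols.map (fun c => (r, c)))).foldl (fun a rc => g a rc.1 rc.2) init) := by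
  induction rows generalizing init with
  | nil => rfl
  | cons r t ih => simp [List.foldl_append, List.foldl_map, ih]

lemma pvPortA_eq (board : List (List String)) (size : Int) (regions : List (List Int)) :
    check_colour_regions board size regions
      = ((pvCells board size regions).foldl pvStepA PySem.Dict.empty).items.all
          (fun p => !decide (p.2 > 1)) := by
  simp only [check_colour_regions, pvCells, pvNestFold, List.foldl_map]
  rfl

lemma pvQueens_cons (x : Int × Bool) (t : List (Int × Bool)) :
    pvQueens (x :: t) = if x.2 = true then x.1 :: pvQueens t else pvQueens t := by
  cases hq : x.2 <;> simp [pvQueens, hq]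

lemma pvSetdefault_getD (d : PySem.Dict Int Int) (g k : Int) :
    ((if d.contains g then d else d.insert g 0) : PySem.Dict Int Int).getD k 0 = d.getD k 0 := by
  by_cases hc : d.contains g = true
  · simp [hc]
  · rw [if_neg hc, PySem.Dict.getD_insert]
    split_ifs with hk
    · subst hk; exact (PySem.Dict.getD_of_not_contains d 0 (by simpa using hc)).symm
    · rfl

lemma pvStepA_getD (d : PySem.Dict Int Int) (x : Int × Bool) (k : Int) :
    (pvStepA d x).getD k 0 = d.getD k 0 + (if x.2 = true ∧ k = x.1 then 1 else 0) := by
  unfold pvStepA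
  cases hq : x.2
  · simp [pvSetdefault_getD]
  · simp only [if_true]
    rw [PySem.Dict.getD_modify, pvSetdefault_getD, pvSetdefault_getD]
    by_cases hk : k = x.1 <;> simp [hk]

lemma pvStepA_nodup (d : PySem.Dict Int Int) (x : Int × Bool) (h : d.keys.Nodup) :
    (pvStepA d x).keys.Nodup := by
  unfold pvStepA
  have h' : ((if d.contains x.1 then d else d.insert x.1 0) : PySem.Dict Int Int).keys.Nodup := by
    split_ifs
    · exact h
    · exact PySem.Dict.nodup_keys_insert d x.1 0 h
  cases x.2
  · simpa using h'
  · simp only [if_true]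
    rw [PySem.Dict.keys_modify]
    exact PySem.Dict.nodup_keys_insert _ _ _ h'

lemma pvStepA_mem_keys (d : PySem.Dict Int Int) (x : Int × Bool) (k : Int)
    (h : k = x.1 ∨ k ∈ d.keys) : k ∈ (pvStepA d x).keys := by
  unfold pvStepA
  have h' : k ∈ ((if d.contains x.1 then d else d.insert x.1 0) : PySem.Dict Int Int).keys := by
    rcases h with h | h
    · rw [h]
      split_ifs with hc
      · exact (PySem.Dict.contains_iff_mem_keys d x.1).mp hc
      · exact (PySem.Dict.mem_keys_insert d x.1 x.1 0).mpr (Or.inl rfl)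
    · split_ifs
      · exact h
      · exact (PySem.Dict.mem_keys_insert d x.1 k 0).mpr (Or.inr h)
  cases x.2
  · simpa using h'
  · simp only [if_true]
    rw [PySem.Dict.keys_modify]
    exact (PySem.Dict.mem_keys_insert _ x.1 k _).mpr (by
      by_cases hk : k = x.1
      · exact Or.inl hk
      · exact Or.inr h')

lemma pvFoldA_getD (cs : List (Int × Bool)) (d : PySem.Dict Int Int) (k : Int) :
    (cs.foldl pvStepA d).getD k 0 = d.getD k 0 + ((pvQueens cs).count k : Int) := by
  induction cs generalizing d with
  | nil => simp [pvQueens]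
  | cons x t ih =>
    rw [List.foldl_cons, ih, pvStepA_getD, pvQueens_cons]
    cases hq : x.2
    · simp
    · simp only [if_true, true_and, List.count_cons]
      by_cases hk : k = x.1 <;> simp [hk] <;> omega

lemma pvFoldA_nodup (cs : List (Int × Bool)) (d : PySem.Dict Int Int) (h : d.keys.Nodup) :
    (cs.foldl pvStepA d).keys.Nodup := by
  induction cs generalizing d with
  | nil => exact h
  | cons x t ih => exact ih _ (pvStepA_nodup d x h)

lemma pvFoldA_mem_keys (cs : List (Int × Bool)) (d : PySem.Dict Int Int) (k : Int)
    (h : k ∈ pvQueens cs ∨ k ∈ d.keys) : k ∈ (cs.foldl pvStepA d).keys := by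
  induction cs generalizing d with
  | nil => simpa [pvQueens] using h
  | cons x t ih =>
    rw [List.foldl_cons]
    apply ih
    rcases h with h | h
    · rw [pvQueens_cons] at h
      cases hq : x.2
      · rw [hq] at h; simp only [Bool.false_eq_true, if_false] at h
        exact Or.inl h
      · rw [hq] at h; simp only [if_true, List.mem_cons] at h
        rcases h with h | h
        · exact Or.inr (pvStepA_mem_keys d x k (Or.inl h))
        · exact Or.inl h
    · exact Or.inr (pvStepA_mem_keys d x k (Or.inr h))

lemma pvLemA (cs : List (Int × Bool)) :
    (((cs.foldl pvStepA PySem.Dict.empty).items.all (fun p => !decide (p.2 > 1))) = true)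
      ↔ (pvQueens cs).Nodup := by
  have hnd : (cs.foldl pvStepA PySem.Dict.empty).keys.Nodup :=
    pvFoldA_nodup cs PySem.Dict.empty (by simp [PySem.Dict.keys_empty])
  have hgetD : ∀ k : Int, (cs.foldl pvStepA PySem.Dict.empty).getD k 0 = ((pvQueens cs).count k : Int) := by
    intro k
    rw [pvFoldA_getD]
    simp [PySem.Dict.getD_empty]
  rw [PySem.Dict.items_eq_map_keys _ hnd 0, List.all_eq_true, List.nodup_iff_count]
  constructor
  · intro hall k
    by_cases hk : k ∈ pvQueens cs
    · have hkey := pvFoldA_mem_keys cs PySem.Dict.empty k (Or.inl hk)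
      have := hall _ (List.mem_map_of_mem hkey)
      simp only [Bool.not_eq_eq_eq_not, Bool.not_true, decide_eq_false_iff_not, not_lt] at this
      rw [hgetD k] at this
      exact_mod_cast this
    · simp [List.count_eq_zero_of_not_mem hk]
  · intro hnodup p hp
    rcases List.mem_map.mp hp with ⟨k, hk, rfl⟩
    have := hnodup k
    have h2 := hgetD k
    simp only [Bool.not_eq_eq_eq_not, Bool.not_true, decide_eq_false_iff_not, not_lt]
    omega

-- B's raw generator list is exactly the queen-cell regions of A's cell sequence
lemma pvQueens_append (a b : List (Int × Bool)) :
    pvQueens (a ++ b) = pvQueens a ++ pvQueens b := by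
  simp [pvQueens]

lemma pvRaw_inner (board : List (List String)) (regions : List (List Int)) (r : Int)
    (cols : List Int) :
    cols.filterMap (fun col =>
        if PySem.List.pyGetD (PySem.List.pyGetD board r []) col "" == "Q"
        then some (PySem.List.pyGetD (PySem.List.pyGetD regions r []) col 0)
        else none)
      = pvQueens (cols.map (fun c => (pvG regions (r, c), pvQ board (r, c)))) := by
  induction cols with
  | nil => rfl
  | cons c t ih =>
    cases hq : (PySem.List.pyGetD (PySem.List.pyGetD board r []) c "" == "Q")
    · rw [List.filterMap_cons_none (by simp [hq]), ih, List.map_cons, pvQueens_cons]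
      simp [pvQ, pvG, hq]
    · rw [List.filterMap_cons_some (b := PySem.List.pyGetD (PySem.List.pyGetD regions r []) c 0) (by simp [hq]), ih, List.map_cons, pvQueens_cons]
      simp [pvQ, pvG, hq]

lemma pvRaw_gen (board : List (List String)) (regions : List (List Int))
    (rows cols : List Int) :
    rows.flatMap (fun row => cols.filterMap (fun col =>
        if PySem.List.pyGetD (PySem.List.pyGetD board row []) col "" == "Q"
        then some (PySem.List.pyGetD (PySem.List.pyGetD regions row []) col 0)
        else none))
      = pvQueens ((rows.flatMap (fun r => cols.map (fun c => (r, c)))).map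
          (fun rc => (pvG regions rc, pvQ board rc))) := by
  induction rows with
  | nil => rfl
  | cons r t ih =>
    simp only [List.flatMap_cons, List.map_append, pvQueens_append, ih]
    congr 1
    simpa [List.map_map, Function.comp] using pvRaw_inner board regions r cols

lemma pvRaw_eq_queens (board : List (List String)) (size : Int) (regions : List (List Int)) :
    pvQueenRegionsRaw board size regions = pvQueens (pvCells board size regions) := by
  unfold pvQueenRegionsRaw pvCells
  exact pvRaw_gen board regions (PySem.List.pyRange 0 size 1) (PySem.List.pyRange 0 size 1)

-- on a ≤-sorted list, "no two adjacent entries equal" is exactly Nodup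
lemma pvAdj_sorted (s : List Int) (hs : s.Pairwise (· ≤ ·)) :
    ((s.zip s.tail).all (fun p => !(p.1 == p.2)) = true) ↔ s.Nodup := by
  induction s with
  | nil => simp
  | cons x t ih =>
    cases t with
    | nil => simp
    | cons y t' =>
      rcases List.pairwise_cons.mp hs with ⟨hx, hs'⟩
      have hxy : x ≤ y := hx y List.mem_cons_self
      have hyt : ∀ z ∈ t', y ≤ z := (List.pairwise_cons.mp hs').1
      have ih' := ih hs'
      constructor
      · intro hall
        simp only [List.tail_cons, List.zip_cons_cons, List.all_cons, Bool.and_eq_true] at hall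
        obtain ⟨h1, h2⟩ := hall
        have hne : x ≠ y := by simpa using h1
        have hnd : (y :: t').Nodup := ih'.mp (by simpa using h2)
        refine List.nodup_cons.mpr ⟨?_, hnd⟩
        intro hmem
        rcases List.mem_cons.mp hmem with h | h
        · exact hne h
        · exact hne (le_antisymm hxy (hyt x h))
      · intro hnd
        rcases List.nodup_cons.mp hnd with ⟨hxmem, hnd'⟩
        simp only [List.tail_cons, List.zip_cons_cons, List.all_cons, Bool.and_eq_true]
        have hne : x ≠ y := fun h => hxmem (by rw [h]; exact List.mem_cons_self)
        refine ⟨by simpa using hne, ?_⟩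
        simpa using ih'.mpr hnd'

-- B's adjacent-pairs check on the sorted list decides Nodup of the raw list
lemma pvSortedAdjNodup (l : List Int) :
    ((((PySem.List.sorted l (fun x => x) false).zip
        (PySem.List.slice (PySem.List.sorted l (fun x => x) false) (some 1) none)).all
        (fun p => !(p.1 == p.2))) = true) ↔ l.Nodup := by
  rw [PySem.List.slice_from_one]
  rw [pvAdj_sorted _ (by simpa using PySem.List.sorted_pairwise l (fun x => x))]
  exact (PySem.List.sorted_perm l (fun x => x) false).nodup_iff

lemma pvPortB_eq (board : List (List String)) (size : Int) (regions : List (List Int)) :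
    (check_colour_regions_alt board size regions = true)
      ↔ (pvQueens (pvCells board size regions)).Nodup := by
  have h : (check_colour_regions_alt board size regions = true)
      ↔ (pvQueenRegionsRaw board size regions).Nodup :=
    pvSortedAdjNodup (pvQueenRegionsRaw board size regions)
  rwa [pvRaw_eq_queens] at h

-- ===== VERDICT (by name: the statement is the Claim_ definition above) =====
theorem check_colour_regions_spec : Claim_equal_check_colour_regions := by
  intro board size regions _ _
  unfold Spec_check_colour_regions
  rw [pvPortA_eq]
  rw [Bool.eq_iff_iff, pvLemA, pvPortB_eq]
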